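-- pv_equiv track=rewrite | github.com/pelavarre/pybashish | bin/column.py | complete_rows
-- ===== SOURCE A (Python) =====
-- def complete_rows(rows, cell):
--     """Add cells till every row is as wide as the widest row"""
--
--     if not rows:
--         return list(rows)
--
--     max_row_width = max(len(row) for row in rows)
--
--     completed_rows = list()
--     for row in rows:
--         completed_row = row + ((max_row_width - len(row)) * [""])
--         completed_rows.append(completed_row)
--
--     return completed_rows
-- ===== SOURCE B (Python) =====
-- def _columns_longest(rows):
--     """Transpose the ragged rows into columns, filling short rows with ""."""
--     cols = []
--     j = 0
--     while any(j < len(r) for r in rows):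
--         cols.append([r[j] if j < len(r) else "" for r in rows])
--         j += 1
--     return cols
--
--
-- def complete_rows(rows, cell):
--     """Add cells till every row is as wide as the widest row"""
--
--     cols = _columns_longest(rows)
--     if not cols:
--         return [[] for _ in rows]
--     return [list(t) for t in zip(*cols)]
-- ===== Notes on version B (the rewrite author's own statement) =====
-- stated objective: alternative
-- what changed: B replaces A's compute-max-then-pad-each-row loop by a double transpose: it builds the fill-completed columns of the ragged rows (zip_longest-style) and transposes them back with zip(*cols), so padding emerges from the column structure rather than from an explicit width subtraction.
import Mathlib
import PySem

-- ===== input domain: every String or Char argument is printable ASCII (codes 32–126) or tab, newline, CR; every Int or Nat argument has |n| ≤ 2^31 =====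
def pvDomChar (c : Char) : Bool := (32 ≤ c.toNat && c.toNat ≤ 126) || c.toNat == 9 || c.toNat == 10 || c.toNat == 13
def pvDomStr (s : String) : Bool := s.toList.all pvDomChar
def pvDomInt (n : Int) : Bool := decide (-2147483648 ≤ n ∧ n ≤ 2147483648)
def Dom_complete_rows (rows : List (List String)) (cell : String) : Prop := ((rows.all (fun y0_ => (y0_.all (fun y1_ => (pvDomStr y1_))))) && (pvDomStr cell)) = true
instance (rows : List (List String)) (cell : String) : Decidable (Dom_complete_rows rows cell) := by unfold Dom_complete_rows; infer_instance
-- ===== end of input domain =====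

-- B pads by transposing the ragged rows into fill-completed columns and transposing back
-- (different decomposition, same cost); neither program mutates its input.

-- max row width (A computes it with Python's max over a nonempty list of lengths ≥ 0;
-- this fold is exact there); also the termination measure of B's column builder cites it.
def pvMaxLen (rows : List (List String)) : Nat := (rows.map List.length).foldr max 0

theorem pvLenLeMax : ∀ {rows : List (List String)} {r : List String},
    r ∈ rows → r.length ≤ pvMaxLen rows
  | [], _, h => by simp at h
  | a :: t, r, h => by
    simp only [pvMaxLen, List.map_cons, List.foldr_cons]
    rcases List.mem_cons.mp h with rfl | h'
    · exact le_max_left _ _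
    · exact le_trans (pvLenLeMax h') (le_max_right _ _)

-- sum of tails of nonempty lists is strictly smaller (termination of pvZip)
theorem pvSumTailLe (cols : List (List String)) :
    ((cols.map (fun c => c.tail)).map List.length).sum ≤ (cols.map List.length).sum := by
  induction cols with
  | nil => simp
  | cons c cs ih =>
    simp only [List.map_cons, List.sum_cons]
    have : c.tail.length ≤ c.length := by simp [List.length_tail]
    omega

theorem pvSumTailLt {cols : List (List String)} (hne : cols ≠ [])
    (hall : ∀ c ∈ cols, c ≠ []) :
    ((cols.map (fun c => c.tail)).map List.length).sum < (cols.map List.length).sum := by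
  cases cols with
  | nil => exact absurd rfl hne
  | cons c cs =>
    have h1 := pvSumTailLe cs
    have hc : c ≠ [] := hall c (by simp)
    have : c.tail.length < c.length := by
      cases c with
      | nil => exact absurd rfl hc
      | cons a t => simp
    simp only [List.map_cons, List.sum_cons]
    omega

-- ===== PORT A =====
def complete_rows (rows : List (List String)) (cell : String) : List (List String) :=
  if rows = [] then rows
  else
    let max_row_width := pvMaxLen rows
    rows.foldl (fun completed_rows row =>
      completed_rows ++ [row ++ List.replicate (max_row_width - row.length) ""]) []

-- ===== PORT B =====
-- Source B's _columns_longest: while any(j < len(r)): emit column j, filling short rows with ""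
def pvColsAux (rows : List (List String)) (j : Nat) : List (List String) :=
  if h : rows.any (fun r => decide (j < r.length)) then
    (rows.map (fun r => if j < r.length then r.getD j "" else "")) :: pvColsAux rows (j + 1)
  else []
termination_by pvMaxLen rows - j
decreasing_by
  simp only [List.any_eq_true, decide_eq_true_eq] at h
  obtain ⟨r, hr, hlt⟩ := h
  have := pvLenLeMax hr
  omega

-- Source B's zip(*cols): stop as soon as there are no columns or some column is exhausted
def pvZip (cols : List (List String)) : List (List String) :=
  if h : (cols.isEmpty || cols.any (fun c => c.isEmpty)) = true then []
  else
    (cols.map (fun c => c.headD "")) :: pvZip (cols.map (fun c => c.tail))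
termination_by (cols.map List.length).sum
decreasing_by
  have hne : cols ≠ [] := by
    intro hnil; exact h (by simp [hnil])
  have hall : ∀ c ∈ cols, c ≠ [] := by
    intro c hc hcnil
    exact h (by
      simp only [Bool.or_eq_true, List.any_eq_true]
      exact Or.inr ⟨c, hc, by simp [hcnil]⟩)
  simpa using pvSumTailLt hne hall

def complete_rows_alt (rows : List (List String)) (cell : String) : List (List String) :=
  let cols := pvColsAux rows 0
  if cols = [] then rows.map (fun _ => [])
  else pvZip cols

-- ===== PRECONDITION & SPEC =====
def Spec_complete_rows (rows : List (List String)) (cell : String) (out : List (List String)) : Prop := out = complete_rows_alt rows cell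
instance (rows : List (List String)) (cell : String) (out : List (List String)) : Decidable (Spec_complete_rows rows cell out) := by unfold Spec_complete_rows; infer_instance

-- ===== CLAIM (what is proved, stated in full; the proofs are below) =====
def Claim_equal_complete_rows : Prop := ∀ (rows : List (List String)) (cell : String), Dom_complete_rows rows cell → Spec_complete_rows rows cell (complete_rows rows cell)

-- ===== LEMMAS AND PROOFS =====

theorem pvMaxLenLe {rows : List (List String)} {j : Nat}
    (h : ∀ r ∈ rows, r.length ≤ j) : pvMaxLen rows ≤ j := by
  induction rows with
  | nil => simp [pvMaxLen]
  | cons a t ih =>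
    have h1 := h a (by simp)
    have ht := ih (fun r hr => h r (by simp [hr]))
    simp only [pvMaxLen, List.map_cons, List.foldr_cons] at ht ⊢
    omega

theorem pvGetD_tail (r : List String) (j : Nat) :
    r.tail.getD j "" = r.getD (j + 1) "" := by
  cases r <;> simp [List.getD]

theorem pvHeadD_eq_getD (r : List String) : r.headD "" = r.getD 0 "" := by
  cases r <;> simp [List.getD]

-- the column builder produces exactly the columns j, j+1, …, maxLen-1
theorem pvColsAux_eq (rows : List (List String)) :
    ∀ n j, pvMaxLen rows - j = n →
      pvColsAux rows j =
        (List.range' j n).map (fun jj => rows.map (fun r => r.getD jj "")) := by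
  intro n
  induction n with
  | zero =>
    intro j hj
    rw [pvColsAux]
    have hno : ¬ rows.any (fun r => decide (j < r.length)) = true := by
      simp only [List.any_eq_true, decide_eq_true_eq, not_exists]
      intro r hmem
      have := pvLenLeMax hmem.1
      omega
    simp [hno]
  | succ n ih =>
    intro j hj
    rw [pvColsAux]
    have hlt : j < pvMaxLen rows := by omega
    have hany : rows.any (fun r => decide (j < r.length)) = true := by
      by_contra hno
      simp only [List.any_eq_true, decide_eq_true_eq, not_exists] at hno
      have hle : ∀ r ∈ rows, r.length ≤ j := by
        intro r hr
        by_contra hgt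
        exact hno r ⟨hr, by omega⟩
      have := pvMaxLenLe hle
      omega
    rw [dif_pos hany, ih (j + 1) (by omega), List.range'_succ, List.map_cons]
    congr 1
    apply List.map_congr_left
    intro r _
    split
    · rfl
    · rw [List.getD_eq_default]; omega

-- pvZip of a nonempty rectangular list of columns is the transpose
theorem pvZip_eq : ∀ (n : Nat) (cols : List (List String)), cols ≠ [] →
    (∀ c ∈ cols, c.length = n) →
    pvZip cols = (List.range n).map (fun i => cols.map (fun c => c.getD i "")) := by
  intro n
  induction n with
  | zero =>
    intro cols hne hall
    rw [pvZip]
    cases cols with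
    | nil => exact absurd rfl hne
    | cons c cs =>
      have hc0 : c = [] := List.length_eq_zero_iff.mp (hall c (by simp))
      subst hc0
      rw [dif_pos (by simp)]
      simp
  | succ n ih =>
    intro cols hne hall
    rw [pvZip]
    have hcond : ¬ (cols.isEmpty || cols.any (fun c => c.isEmpty)) = true := by
      simp only [Bool.or_eq_true, List.any_eq_true, List.isEmpty_iff, not_or, not_exists]
      refine ⟨hne, fun c h' => ?_⟩
      obtain ⟨hc, rfl⟩ := h'
      have := hall _ hc
      simp at this
    rw [dif_neg hcond]
    have htne : cols.map (fun c => c.tail) ≠ [] := by simpa using hne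
    have htall : ∀ c ∈ cols.map (fun c => c.tail), c.length = n := by
      intro c hc
      simp only [List.mem_map] at hc
      obtain ⟨c', hc', rfl⟩ := hc
      have := hall c' hc'
      simp [List.length_tail, this]
    rw [ih _ htne htall, List.range_succ_eq_map, List.map_cons, List.map_map]
    congr 1
    · exact List.map_congr_left (fun c _ => pvHeadD_eq_getD c)
    · apply List.map_congr_left
      intro i _
      rw [List.map_map]
      apply List.map_congr_left
      intro c _
      exact pvGetD_tail c i

-- A's accumulator loop is a map
theorem pvFoldlApp (f : List String → List String) :
    ∀ (l : List (List String)) (acc : List (List String)),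
      l.foldl (fun a x => a ++ [f x]) acc = acc ++ l.map f := by
  intro l
  induction l with
  | nil => simp
  | cons x t ih => intro acc; simp [ih]

-- padding with "" to width W, written positionally
theorem pvPadEq : ∀ (r : List String) (W : Nat), r.length ≤ W →
    r ++ List.replicate (W - r.length) "" = (List.range W).map (fun j => r.getD j "") := by
  intro r
  induction r with
  | nil =>
    intro W _
    simp [List.getD, List.map_const']
  | cons a t ih =>
    intro W hW
    cases W with
    | zero => simp at hW
    | succ W' =>
      rw [List.range_succ_eq_map]
      simp only [List.map_cons, List.map_map]
      have h1 : t ++ List.replicate (W' - t.length) "" =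
          (List.range W').map (fun j => t.getD j "") := ih W' (by simpa using hW)
      simp only [List.length_cons, Nat.succ_sub_succ, List.cons_append, List.getD]
      rw [h1]
      rfl

-- ===== VERDICT (by name: the statement is the Claim_ definition above) =====
theorem complete_rows_spec : Claim_equal_complete_rows := by
  intro rows cell _dom
  unfold Spec_complete_rows complete_rows complete_rows_alt
  by_cases hrows : rows = []
  · subst hrows
    rw [pvColsAux_eq [] 0 0 (by simp [pvMaxLen])]
    simp
  · rw [if_neg hrows]
    have hcols : pvColsAux rows 0 =
        (List.range (pvMaxLen rows)).map (fun jj => rows.map (fun r => r.getD jj "")) := by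
      rw [pvColsAux_eq rows (pvMaxLen rows) 0 (by omega), ← List.range_eq_range']
    rw [pvFoldlApp]
    by_cases hW : pvMaxLen rows = 0
    · have hcnil : pvColsAux rows 0 = [] := by rw [hcols, hW]; simp
      rw [hcnil, if_pos rfl]
      simp only [List.nil_append]
      apply List.map_congr_left
      intro r hr
      have h1 : r.length ≤ pvMaxLen rows := pvLenLeMax hr
      have h2 : r = [] := List.length_eq_zero_iff.mp (by omega)
      subst h2
      simp [hW]
    · have hcne : pvColsAux rows 0 ≠ [] := by
        rw [hcols]
        simp [List.range_eq_nil, hW]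
      rw [if_neg hcne]
      have hrect : ∀ c ∈ pvColsAux rows 0, c.length = rows.length := by
        intro c hc
        rw [hcols] at hc
        simp only [List.mem_map] at hc
        obtain ⟨j, _, rfl⟩ := hc
        simp
      rw [pvZip_eq rows.length _ hcne hrect]
      apply List.ext_getElem
      · simp
      · intro i hi1 hi2
        have hi : i < rows.length := by simpa using hi1
        simp only [List.nil_append, List.getElem_map, List.getElem_range, hcols,
          List.map_map]
        have hmem : rows[i] ∈ rows := List.getElem_mem _
        rw [pvPadEq rows[i] (pvMaxLen rows) (pvLenLeMax hmem)]
        apply List.map_congr_left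
        intro j _
        simp only [Function.comp]
        rw [List.getD_eq_getElem (rows.map fun r => r.getD j "") "" (by simpa using hi),
          List.getElem_map]
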